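-- pv_equiv track=rewrite | github.com/microsoft/RD-Agent | rdagent/scenarios/qlib/factor_experiment_loader/pdf_loader.py | merge_file_to_factor_dict_to_factor_dict
-- ===== SOURCE A (Python) =====
-- def merge_file_to_factor_dict_to_factor_dict(
--     file_to_factor_dict: dict[str, dict],
-- ) -> dict:
--     factor_dict = {}
--     for file_name in file_to_factor_dict:
--         for factor_name in file_to_factor_dict[file_name]:
--             factor_dict.setdefault(factor_name, [])
--             factor_dict[factor_name].append(file_to_factor_dict[file_name][factor_name])
--
--     factor_dict_simple_deduplication = {}
--     for factor_name in factor_dict: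
--         if len(factor_dict[factor_name]) > 1:
--             factor_dict_simple_deduplication[factor_name] = max(
--                 factor_dict[factor_name],
--                 key=lambda x: len(x["formulation"]),
--             )
--         else:
--             factor_dict_simple_deduplication[factor_name] = factor_dict[factor_name][0]
--     return factor_dict_simple_deduplication
-- ===== SOURCE B (Python) =====
-- def merge_file_to_factor_dict_to_factor_dict(
--     file_to_factor_dict: dict[str, dict],
-- ) -> dict:
--     # one pass: keep, per factor name, the first value whose 'formulation' is
--     # strictly longest (matching max()'s first-maximal tie-breaking)
--     result = {}
--     for factor_dict in file_to_factor_dict.values():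
--         for factor_name, value in factor_dict.items():
--             cur = result.get(factor_name)
--             if cur is None:
--                 result[factor_name] = value
--             elif len(value["formulation"]) > len(cur["formulation"]):
--                 result[factor_name] = value
--     return result
-- ===== Notes on version B (the rewrite author's own statement) =====
-- stated objective: simpler
-- what changed: Replaces A's two passes (group every value per factor name into lists, then a second dict pass taking max by formulation length) with a single pass keeping one running best value per factor name, overwriting only on strictly longer 'formulation' so ties keep the earlier element exactly like max().
import Mathlib
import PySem

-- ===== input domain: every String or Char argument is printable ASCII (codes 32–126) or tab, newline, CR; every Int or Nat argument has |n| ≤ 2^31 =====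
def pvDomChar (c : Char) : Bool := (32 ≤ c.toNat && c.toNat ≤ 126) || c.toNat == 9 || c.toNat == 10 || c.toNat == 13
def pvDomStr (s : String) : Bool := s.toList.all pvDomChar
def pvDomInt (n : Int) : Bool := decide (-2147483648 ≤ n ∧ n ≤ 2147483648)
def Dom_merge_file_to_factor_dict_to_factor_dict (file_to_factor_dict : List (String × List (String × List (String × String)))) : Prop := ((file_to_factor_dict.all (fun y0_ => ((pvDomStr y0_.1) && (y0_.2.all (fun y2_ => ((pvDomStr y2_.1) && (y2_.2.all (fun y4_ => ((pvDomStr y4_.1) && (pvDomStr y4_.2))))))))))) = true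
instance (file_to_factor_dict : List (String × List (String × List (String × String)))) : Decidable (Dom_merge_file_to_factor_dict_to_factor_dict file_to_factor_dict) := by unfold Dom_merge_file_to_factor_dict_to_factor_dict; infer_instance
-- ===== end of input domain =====

-- B replaces A's two passes (group values per name, then max by formulation length) by one pass
-- keeping a single running best value per factor name; same return value, no speed claim.

-- len(x["formulation"]) — the key of A's max() and B's comparison; getD "" is exact wherever
-- Pre_ holds (there the key is present wherever either Python evaluates it)
def pvFormLen (x : List (String × String)) : Int :=
  PySem.Str.len (PySem.Dict.getD (PySem.Dict.mk x) "formulation" "")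

-- ===== PORT A =====
-- first loop: factor_dict.setdefault(name, []); factor_dict[name].append(v)  ≡  d[name] = d.get(name, []) + [v]
def pvGatherLists (file_to_factor_dict : List (String × List (String × List (String × String)))) : PySem.Dict String (List (List (String × String))) :=
  file_to_factor_dict.foldl
    (fun acc p => p.2.foldl (fun a q => a.modify q.1 [] (· ++ [q.2])) acc)
    PySem.Dict.empty

-- body of A's second loop: max(lst, key=lambda x: len(x["formulation"])) if len(lst) > 1 else lst[0]
def pvPick (vs : List (List (String × String))) : List (String × String) :=
  if vs.length > 1 then PySem.List.maxD vs pvFormLen [] else PySem.List.pyGetD vs 0 []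

def merge_file_to_factor_dict_to_factor_dict (file_to_factor_dict : List (String × List (String × List (String × String)))) : List (String × List (String × String)) :=
  ((pvGatherLists file_to_factor_dict).items.foldl
      (fun acc p => acc.insert p.1 (pvPick p.2))
      PySem.Dict.empty).items

-- ===== PORT B =====
def merge_file_to_factor_dict_to_factor_dict_alt (file_to_factor_dict : List (String × List (String × List (String × String)))) : List (String × List (String × String)) :=
  (file_to_factor_dict.foldl
      (fun r p => p.2.foldl
        (fun r q =>
          match r.get? q.1 with
          | none => r.insert q.1 q.2
          | some cur => if pvFormLen cur < pvFormLen q.2 then r.insert q.1 q.2 else r)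
        r)
      PySem.Dict.empty).items

-- ===== PRECONDITION & SPEC =====
def pvFlat (file_to_factor_dict : List (String × List (String × List (String × String)))) : List (String × List (String × String)) :=
  file_to_factor_dict.flatMap Prod.snd

-- Pre_ excludes (a) association lists with a duplicate file name or a duplicate factor name inside
-- one file — such lists encode no Python dict (dict construction collapses duplicates), so no input
-- of the Python function is excluded by them — and (b) inputs where a factor name occurring more
-- than once has a value without the "formulation" key: there A (and B) raises KeyError.
def Pre_merge_file_to_factor_dict_to_factor_dict (file_to_factor_dict : List (String × List (String × List (String × String)))) : Prop :=
  (file_to_factor_dict.map Prod.fst).Nodup ∧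
  (∀ p ∈ file_to_factor_dict, (p.2.map Prod.fst).Nodup) ∧
  (∀ q ∈ pvFlat file_to_factor_dict,
     1 < (pvFlat file_to_factor_dict).countP (fun r => r.1 == q.1) →
     (PySem.Dict.mk q.2).contains "formulation" = true)

instance (file_to_factor_dict : List (String × List (String × List (String × String)))) : Decidable (Pre_merge_file_to_factor_dict_to_factor_dict file_to_factor_dict) := by
  unfold Pre_merge_file_to_factor_dict_to_factor_dict; infer_instance

def pvWitness_merge_file_to_factor_dict_to_factor_dict : (List (String × List (String × List (String × String)))) :=
  [("f1", [("x", [("formulation", "abc")])]),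
   ("f2", [("x", [("formulation", "ab")]), ("y", [("description", "d")])])]

def Spec_merge_file_to_factor_dict_to_factor_dict (file_to_factor_dict : List (String × List (String × List (String × String)))) (out : List (String × List (String × String))) : Prop := out = merge_file_to_factor_dict_to_factor_dict_alt file_to_factor_dict
instance (file_to_factor_dict : List (String × List (String × List (String × String)))) (out : List (String × List (String × String))) : Decidable (Spec_merge_file_to_factor_dict_to_factor_dict file_to_factor_dict out) := by unfold Spec_merge_file_to_factor_dict_to_factor_dict; infer_instance

-- ===== CLAIM (what is proved, stated in full; the proofs are below) =====
def Claim_equal_merge_file_to_factor_dict_to_factor_dict : Prop := ∀ (file_to_factor_dict : List (String × List (String × List (String × String)))), Dom_merge_file_to_factor_dict_to_factor_dict file_to_factor_dict → Pre_merge_file_to_factor_dict_to_factor_dict file_to_factor_dict → Spec_merge_file_to_factor_dict_to_factor_dict file_to_factor_dict (merge_file_to_factor_dict_to_factor_dict file_to_factor_dict)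

-- ===== LEMMAS AND PROOFS =====

-- B's post-processing of A's grouped dict: pick one value per name
def pvPost (d : PySem.Dict String (List (List (String × String)))) : PySem.Dict String (List (String × String)) :=
  PySem.Dict.mk (d.items.map (fun p => (p.1, pvPick p.2)))

lemma pvFoldl_foldl_eq_flat {β : Type} (g : β → (String × List (String × String)) → β)
    (xs : List (String × List (String × List (String × String)))) (init : β) :
    xs.foldl (fun a p => p.2.foldl g a) init = (pvFlat xs).foldl g init := by
  induction xs generalizing init with
  | nil => rfl
  | cons h t ih =>
      simp only [pvFlat, List.foldl_cons, List.flatMap_cons, List.foldl_append] at *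
      exact ih _

lemma pvGet?_mk_map {ν ν' : Type} (f : ν → ν') (l : List (String × ν)) (k : String) :
    (PySem.Dict.mk (l.map (fun p => (p.1, f p.2)))).get? k
      = ((PySem.Dict.mk l).get? k).map f := by
  induction l with
  | nil => rfl
  | cons p t ih =>
      obtain ⟨a, b⟩ := p
      simp only [List.map_cons, PySem.Dict.get?_mk_cons]
      by_cases h : (a == k) <;> simp [h, ih]

lemma pvMax?_snoc {α : Type} (key : α → Int) (vs : List α) (x : α) :
    PySem.List.max? (vs ++ [x]) key =
      some (match PySem.List.max? vs key with
            | none => x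
            | some m => if key m < key x then x else m) := by
  unfold PySem.List.max?
  rw [List.foldl_append]
  generalize List.foldl _ none vs = acc
  rcases acc with _ | m
  · rfl
  · simp only [List.foldl_cons, List.foldl_nil]
    split <;> rfl

lemma pvPick_singleton (x : List (String × String)) : pvPick [x] = x := by
  simp [pvPick, PySem.List.pyGetD, PySem.List.pyGet?, PySem.List.pyIdx?]

lemma pvPick_eq_maxD (vs : List (List (String × String))) (h : vs ≠ []) :
    pvPick vs = PySem.List.maxD vs pvFormLen [] := by
  cases vs with
  | nil => exact absurd rfl h
  | cons v t =>
      cases t with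
      | nil => simp [pvPick_singleton, PySem.List.maxD, PySem.List.max?]
      | cons w u => simp [pvPick]

lemma pvPick_snoc (vs : List (List (String × String))) (x : List (String × String)) (h : vs ≠ []) :
    pvPick (vs ++ [x]) = if pvFormLen (pvPick vs) < pvFormLen x then x else pvPick vs := by
  rw [pvPick_eq_maxD _ (by simp), pvPick_eq_maxD _ h]
  unfold PySem.List.maxD
  rw [pvMax?_snoc]
  rcases hm : PySem.List.max? vs pvFormLen with _ | m
  · exact absurd ((PySem.List.max?_eq_none_iff vs pvFormLen).mp hm) h
  · simp only [Option.getD_some]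

-- one step of B on the post-processed dict is post-processing of one step of A
lemma pvStep_commute (d : PySem.Dict String (List (List (String × String))))
    (q : String × List (String × String))
    (hnd : d.keys.Nodup) (hne : ∀ p ∈ d.items, p.2 ≠ []) :
    (match (pvPost d).get? q.1 with
     | none => (pvPost d).insert q.1 q.2
     | some cur => if pvFormLen cur < pvFormLen q.2 then (pvPost d).insert q.1 q.2 else pvPost d)
    = pvPost (d.modify q.1 [] (· ++ [q.2])) := by
  have hget : (pvPost d).get? q.1 = (d.get? q.1).map pvPick := pvGet?_mk_map _ _ _
  rcases hc : d.get? q.1 with _ | vs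
  · -- new key: both sides append
    have hcontains : d.contains q.1 = false := by
      rw [PySem.Dict.contains_eq_isSome_get?, hc]; rfl
    have hcontains' : (pvPost d).contains q.1 = false := by
      rw [PySem.Dict.contains_eq_isSome_get?, hget, hc]; rfl
    rw [hget, hc]
    simp only [Option.map_none]
    apply PySem.Dict.ext
    rw [PySem.Dict.items_insert_of_not_contains _ _ hcontains']
    show _ = (PySem.Dict.mk ((d.insert q.1 ((d.getD q.1 []) ++ [q.2])).items.map _)).items
    rw [PySem.Dict.getD_of_get?_eq_none _ _ hc,
        PySem.Dict.items_insert_of_not_contains _ _ hcontains]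
    simp [pvPost, pvPick_singleton]
  · -- existing key: replace in place
    have hvs : vs ≠ [] := hne _ (PySem.Dict.mem_items_of_get?_eq_some _ hc)
    have hcontains : d.contains q.1 = true := by
      rw [PySem.Dict.contains_eq_isSome_get?, hc]; rfl
    have hcontains' : (pvPost d).contains q.1 = true := by
      rw [PySem.Dict.contains_eq_isSome_get?, hget, hc]; rfl
    have hval : ∀ p ∈ d.items, p.1 = q.1 → p.2 = vs := by
      intro p hp hpq
      have := PySem.Dict.get?_of_mem_items d (k := p.1) (v := p.2) (by exact hp) hnd
      rw [hpq, hc] at this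
      exact (Option.some.injEq _ _).mp this.symm
    have hnew := pvPick_snoc vs q.2 hvs
    rw [hget, hc]
    simp only [Option.map_some]
    apply PySem.Dict.ext
    have hrhs : (pvPost (d.modify q.1 [] (· ++ [q.2]))).items
        = d.items.map (fun p => if p.1 == q.1 then (q.1, pvPick (vs ++ [q.2])) else (p.1, pvPick p.2)) := by
      show ((d.insert q.1 ((d.getD q.1 []) ++ [q.2])).items.map _) = _
      rw [PySem.Dict.getD_of_get?_eq_some _ _ hc,
          PySem.Dict.items_insert_of_contains _ _ hcontains, List.map_map]
      apply List.map_congr_left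
      intro p _
      by_cases h : p.1 = q.1 <;> simp [h]
    rw [hrhs]
    split
    · rename_i hlt
      rw [PySem.Dict.items_insert_of_contains _ _ hcontains']
      simp only [pvPost, List.map_map]
      apply List.map_congr_left
      intro p _
      by_cases h : p.1 = q.1 <;> simp [h, hnew, hlt]
    · rename_i hlt
      show d.items.map _ = _
      apply List.map_congr_left
      intro p hp
      by_cases h : p.1 = q.1
      · have h2 : p.2 = vs := hval p hp h
        simp [h, hnew, hlt, h2]
      · simp [h]

lemma pvModify_keys_nodup (d : PySem.Dict String (List (List (String × String))))
    (q : String × List (String × String)) (hnd : d.keys.Nodup) :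
    (d.modify q.1 [] (· ++ [q.2])).keys.Nodup := by
  show (d.insert q.1 _).keys.Nodup
  rcases hc : d.contains q.1 with _ | _
  · rw [PySem.Dict.keys_insert_of_not_contains _ _ hc, List.nodup_append]
    refine ⟨hnd, List.nodup_singleton _, ?_⟩
    intro a ha b hb
    rw [List.mem_singleton] at hb
    subst hb
    intro heq
    subst heq
    rw [← PySem.Dict.contains_iff_mem_keys, hc] at ha
    exact Bool.false_ne_true ha
  · rw [PySem.Dict.keys_insert_of_contains _ _ hc]
    exact hnd

lemma pvModify_ne (d : PySem.Dict String (List (List (String × String))))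
    (q : String × List (String × String)) (hne : ∀ p ∈ d.items, p.2 ≠ []) :
    ∀ p ∈ (d.modify q.1 [] (· ++ [q.2])).items, p.2 ≠ [] := by
  intro p hp
  rcases hc : d.contains q.1 with _ | _
  · rw [show d.modify q.1 [] (· ++ [q.2]) = d.insert q.1 ((d.getD q.1 []) ++ [q.2]) from rfl,
        PySem.Dict.items_insert_of_not_contains _ _ hc] at hp
    rcases List.mem_append.mp hp with h | h
    · exact hne _ h
    · rw [List.mem_singleton] at h; subst h; simp
  · rw [show d.modify q.1 [] (· ++ [q.2]) = d.insert q.1 ((d.getD q.1 []) ++ [q.2]) from rfl,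
        PySem.Dict.items_insert_of_contains _ _ hc] at hp
    rcases List.mem_map.mp hp with ⟨r, hr, hrp⟩
    by_cases h : r.1 = q.1
    · rw [if_pos (by simp [h])] at hrp; subst hrp; simp
    · rw [if_neg (by simp [h])] at hrp; subst hrp; exact hne _ hr

lemma pvMain (l : List (String × List (String × String)))
    (d : PySem.Dict String (List (List (String × String))))
    (hnd : d.keys.Nodup) (hne : ∀ p ∈ d.items, p.2 ≠ []) :
    l.foldl
      (fun r q =>
        match r.get? q.1 with
        | none => r.insert q.1 q.2
        | some cur => if pvFormLen cur < pvFormLen q.2 then r.insert q.1 q.2 else r)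
      (pvPost d)
    = pvPost (l.foldl (fun a q => a.modify q.1 [] (· ++ [q.2])) d) := by
  induction l generalizing d with
  | nil => rfl
  | cons q t ih =>
      simp only [List.foldl_cons]
      rw [pvStep_commute d q hnd hne]
      exact ih _ (pvModify_keys_nodup d q hnd) (pvModify_ne d q hne)

lemma pvGather_eq_flat (xs : List (String × List (String × List (String × String)))) :
    pvGatherLists xs = (pvFlat xs).foldl (fun a q => a.modify q.1 [] (· ++ [q.2])) PySem.Dict.empty :=
  pvFoldl_foldl_eq_flat _ xs _

lemma pvGather_nodup (xs : List (String × List (String × List (String × String)))) :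
    (pvGatherLists xs).keys.Nodup := by
  rw [pvGather_eq_flat]
  exact PySem.Dict.nodup_keys_foldl_modify_key (pvFlat xs) Prod.fst []
    (fun _ q => (· ++ [q.2])) PySem.Dict.empty List.nodup_nil

-- ===== VERDICT (by name: the statement is the Claim_ definition above) =====
theorem merge_file_to_factor_dict_to_factor_dict_spec : Claim_equal_merge_file_to_factor_dict_to_factor_dict := by
  intro xs _ _
  unfold Spec_merge_file_to_factor_dict_to_factor_dict
  unfold merge_file_to_factor_dict_to_factor_dict merge_file_to_factor_dict_to_factor_dict_alt
  rw [pvFoldl_foldl_eq_flat]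
  have hB : (pvFlat xs).foldl
      (fun r q =>
        match r.get? q.1 with
        | none => r.insert q.1 q.2
        | some cur => if pvFormLen cur < pvFormLen q.2 then r.insert q.1 q.2 else r)
      PySem.Dict.empty
      = pvPost ((pvFlat xs).foldl (fun a q => a.modify q.1 [] (· ++ [q.2])) PySem.Dict.empty) :=
    pvMain (pvFlat xs) PySem.Dict.empty List.nodup_nil (by intro p hp; exact absurd hp (List.not_mem_nil))
  rw [hB, ← pvGather_eq_flat]
  rw [PySem.Dict.items_foldl_insert_fresh (pvGatherLists xs).items Prod.fst
        (fun p => pvPick p.2) PySem.Dict.empty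
        (fun a _ => rfl)
        (pvGather_nodup xs)]
  rfl
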